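-- pv_equiv track=rewrite | github.com/6jwj6/dpjoin | gen_synop.py | compute_dp_indexes
-- ===== SOURCE A (Python) =====
-- def compute_dp_indexes(true_histogram, noisy_histogram):
--     """
--     Computes DP indexes based on the true and noisy histograms.
--
--     Parameters:
--     - true_histogram (list of int): Actual histogram counts.
--     - noisy_histogram (list of int): Noisy histogram counts.
--
--     Returns:
--     - indexes (list of tuples): Ordered list of (lo_i, hi_i) index pairs.
--     """
--
--     C = sum(true_histogram)
--     binnum = len(noisy_histogram)
--
--     # Initialize the list to store index pairs
--     indexes = []
--
--     # Calculate hi and lo for each bin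
--     for i in range(binnum):
--         hi_i = min(sum(noisy_histogram[:i+1]), C)  # Calculate hi_i and clip to C if needed
--
--         reverse_sum = sum(noisy_histogram[i:])
--         lo_i = max(C - reverse_sum, 0)  # Calculate lo_i and clip to 0 if needed
--
--         indexes.append((lo_i, hi_i))
--
--     return indexes
-- ===== SOURCE B (Python) =====
-- def compute_dp_indexes(true_histogram, noisy_histogram):
--     C = sum(true_histogram)
--     S = sum(noisy_histogram)
--     indexes = []
--     prefix = 0
--     for x in noisy_histogram:
--         lo = C - S + prefix  # C - suffix_sum_from_here, since suffix = S - prefix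
--         prefix += x
--         indexes.append((max(lo, 0), min(prefix, C)))
--     return indexes
-- ===== Notes on version B (the rewrite author's own statement) =====
-- stated objective: faster
-- what changed: Replaced the per-bin recomputation of prefix and suffix sums via slices with a single pass maintaining a running prefix sum (suffix = total - prefix).
import Mathlib
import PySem

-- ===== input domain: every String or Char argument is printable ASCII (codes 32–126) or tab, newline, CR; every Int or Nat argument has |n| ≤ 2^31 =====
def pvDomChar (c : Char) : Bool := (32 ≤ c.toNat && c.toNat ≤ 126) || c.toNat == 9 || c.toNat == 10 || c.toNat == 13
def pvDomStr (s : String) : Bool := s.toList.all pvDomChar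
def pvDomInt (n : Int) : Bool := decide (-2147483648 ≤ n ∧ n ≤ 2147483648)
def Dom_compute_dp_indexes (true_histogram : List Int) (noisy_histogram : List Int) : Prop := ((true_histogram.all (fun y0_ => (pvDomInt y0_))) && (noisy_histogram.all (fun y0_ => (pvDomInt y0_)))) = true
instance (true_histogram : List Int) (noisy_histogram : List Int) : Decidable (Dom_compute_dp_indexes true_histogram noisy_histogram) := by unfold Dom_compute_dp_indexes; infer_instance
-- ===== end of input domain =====

-- B replaces A's per-bin slice sums by one pass with a running prefix sum (suffix = total - prefix): O(n) instead of O(n^2).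
-- ===== PORT A =====
def compute_dp_indexes (true_histogram : List Int) (noisy_histogram : List Int) : List (Int × Int) :=
  let C := true_histogram.sum
  let binnum := PySem.List.len noisy_histogram
  (PySem.List.pyRange 0 binnum 1).foldl (fun indexes i =>
    let hi_i := min (PySem.List.slice noisy_histogram none (some (i + 1))).sum C
    let reverse_sum := (PySem.List.slice noisy_histogram (some i) none).sum
    let lo_i := max (C - reverse_sum) 0
    indexes ++ [(lo_i, hi_i)]) []

-- ===== PORT B =====
def compute_dp_indexes_alt (true_histogram : List Int) (noisy_histogram : List Int) : List (Int × Int) :=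
  let C := true_histogram.sum
  let S := noisy_histogram.sum
  (noisy_histogram.foldl (fun (st : Int × List (Int × Int)) x =>
      let lo := C - S + st.1
      let pfx := st.1 + x
      (pfx, st.2 ++ [(max lo 0, min pfx C)])) (0, ([] : List (Int × Int)))).2

-- ===== PRECONDITION & SPEC =====
def Spec_compute_dp_indexes (true_histogram : List Int) (noisy_histogram : List Int) (out : List (Int × Int)) : Prop := out = compute_dp_indexes_alt true_histogram noisy_histogram
instance (true_histogram : List Int) (noisy_histogram : List Int) (out : List (Int × Int)) : Decidable (Spec_compute_dp_indexes true_histogram noisy_histogram out) := by unfold Spec_compute_dp_indexes; infer_instance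

-- ===== CLAIM (what is proved, stated in full; the proofs are below) =====
def Claim_equal_compute_dp_indexes : Prop := ∀ (true_histogram : List Int) (noisy_histogram : List Int), Dom_compute_dp_indexes true_histogram noisy_histogram → Spec_compute_dp_indexes true_histogram noisy_histogram (compute_dp_indexes true_histogram noisy_histogram)

-- ===== LEMMAS AND PROOFS =====

-- A's loop body, as a function of the bin index (take/drop sums in place of slices).
def pvAfun (C : Int) (n : List Int) (k : Nat) : Int × Int :=
  (max (C - (n.drop k).sum) 0, min ((n.take (k + 1)).sum) C)

lemma portA_eq_map (t n : List Int) :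
    compute_dp_indexes t n = (List.range n.length).map (pvAfun t.sum n) := by
  unfold compute_dp_indexes
  rw [PySem.List.foldl_append_singleton_eq_map
        (f := fun i => (max (t.sum - (PySem.List.slice n (some i) none).sum) 0,
                        min (PySem.List.slice n none (some (i + 1))).sum t.sum)),
      PySem.List.len_eq, PySem.List.pyRange_zero_natCast, List.map_map]
  refine List.map_congr_left (fun k _ => ?_)
  simp only [Function.comp_apply]
  have h1 : ((k : Int) + 1) = ((k + 1 : Nat) : Int) := by push_cast; ring
  rw [PySem.List.slice_from_natCast, h1, PySem.List.slice_to_natCast]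
  rfl

-- B's loop invariant: the fold from prefix p emits the pairs of pvAfun shifted by p.
lemma portB_inv (C S : Int) (n : List Int) (p : Int) (acc : List (Int × Int)) :
    (n.foldl (fun (st : Int × List (Int × Int)) x =>
        (st.1 + x, st.2 ++ [(max (C - S + st.1) 0, min (st.1 + x) C)])) (p, acc)).2
      = acc ++ (List.range n.length).map
          (fun k => (max (C - S + p + (n.take k).sum) 0, min (p + (n.take (k + 1)).sum) C)) := by
  induction n generalizing p acc with
  | nil => simp
  | cons x xs ih =>
    rw [List.foldl_cons, ih]
    simp only [List.length_cons, List.range_succ_eq_map, List.map_cons, List.map_map,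
      List.take_zero, List.sum_nil, add_zero, List.take_succ_cons, List.sum_cons,
      List.append_assoc, List.singleton_append]
    congr 1
    congr 1
    refine List.map_congr_left fun k _ => ?_
    simp only [Function.comp_apply, List.take_succ_cons, List.sum_cons, Nat.succ_eq_add_one, Prod.mk.injEq]
    exact ⟨by omega, by omega⟩

lemma portB_eq_map (t n : List Int) :
    compute_dp_indexes_alt t n = (List.range n.length).map (pvAfun t.sum n) := by
  have h0 : compute_dp_indexes_alt t n
      = (n.foldl (fun (st : Int × List (Int × Int)) x =>
          (st.1 + x, st.2 ++ [(max (t.sum - n.sum + st.1) 0, min (st.1 + x) t.sum)]))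
          (0, ([] : List (Int × Int)))).2 := rfl
  rw [h0, portB_inv]
  simp only [List.nil_append]
  refine List.map_congr_left fun k _ => ?_
  have h := List.sum_take_add_sum_drop n k
  simp only [pvAfun, Prod.mk.injEq, add_zero]
  exact ⟨by omega, by omega⟩


-- ===== VERDICT =====
theorem compute_dp_indexes_spec : Claim_equal_compute_dp_indexes := by
  intro t n _
  unfold Spec_compute_dp_indexes
  rw [portA_eq_map, portB_eq_map]
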